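-- pv_equiv track=rewrite | github.com/q13245632/CodeWars | SimpleFun#160CutTheRopes.py | cut_the_ropes
-- ===== SOURCE A (Python) =====
-- from collections import Counter
--
-- def cut_the_ropes(arr):
--     l = len(arr)
--     cur = 0
--     c = Counter(arr)
--     s = sorted(set(arr))
--     lst = []
--     for k in s:
--         lst.append(l)
--         cur = c[k]
--         l -= cur
--     return lst
-- ===== SOURCE B (Python) =====
-- def cut_the_ropes(arr):
--     return [sum(1 for x in arr if x >= v) for v in sorted(set(arr))]
-- ===== Notes on version B (the rewrite author's own statement) =====
-- stated objective: simpler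
-- what changed: Drops A's Counter and running-remainder subtraction entirely: B just counts, independently for each distinct length, how many ropes are at least that long (a direct comprehension with an inner counting scan, no shared mutable state).
import Mathlib
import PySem

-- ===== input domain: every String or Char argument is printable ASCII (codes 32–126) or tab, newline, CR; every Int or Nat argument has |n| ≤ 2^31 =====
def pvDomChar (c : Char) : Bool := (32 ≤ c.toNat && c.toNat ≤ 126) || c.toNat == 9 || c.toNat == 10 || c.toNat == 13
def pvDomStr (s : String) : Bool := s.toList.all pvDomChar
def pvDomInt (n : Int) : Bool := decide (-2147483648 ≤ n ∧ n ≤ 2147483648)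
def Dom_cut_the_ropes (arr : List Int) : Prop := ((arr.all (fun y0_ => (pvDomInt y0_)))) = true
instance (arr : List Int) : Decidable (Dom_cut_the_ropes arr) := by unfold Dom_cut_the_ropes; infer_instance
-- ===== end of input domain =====

-- B drops A's Counter and running-remainder state: it counts, independently for each
-- distinct length, how many ropes are at least that long (objective: simpler; not faster).

-- ===== PORT A =====
def cut_the_ropes (arr : List Int) : List Int :=
  let l : Int := arr.length
  let c : PySem.Dict Int Int := PySem.Dict.counter arr
  let s : List Int := PySem.List.sorted (PySem.Set.ofList arr) (fun x => x)
  let r := s.foldl (fun (st : Int × List Int) k => (st.1 - c.getD k 0, st.2 ++ [st.1])) (l, [])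
  r.2

-- ===== PORT B =====
-- Source B: [sum(1 for x in arr if x >= v) for v in sorted(set(arr))]
-- the inner generator-sum is a count of the elements satisfying x >= v (List.countP)
def cut_the_ropes_alt (arr : List Int) : List Int :=
  (PySem.List.sorted (PySem.Set.ofList arr) (fun x => x)).map
    (fun v => (arr.countP (fun x => v ≤ x) : Int))

-- ===== PRECONDITION & SPEC =====
def Spec_cut_the_ropes (arr : List Int) (out : List Int) : Prop := out = cut_the_ropes_alt arr
instance (arr : List Int) (out : List Int) : Decidable (Spec_cut_the_ropes arr out) := by
  unfold Spec_cut_the_ropes; infer_instance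

-- ===== CLAIM =====
def Claim_equal_cut_the_ropes : Prop :=
  ∀ (arr : List Int), Dom_cut_the_ropes arr → Spec_cut_the_ropes arr (cut_the_ropes arr)

-- ===== LEMMAS AND PROOFS =====

-- splitting a ≥-count at the next distinct value: the elements ≥ k are those = k plus those ≥ k'
lemma countP_split (k k' : Int) (hkk : k < k') :
    ∀ (arr : List Int), (∀ x ∈ arr, k ≤ x → (x = k ∨ k' ≤ x)) →
    arr.countP (fun x => decide (k ≤ x)) =
      arr.count k + arr.countP (fun x => decide (k' ≤ x)) := by
  intro arr
  induction arr with
  | nil => simp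
  | cons a as ih =>
    intro h
    have ha := h a (List.mem_cons_self)
    have htl := ih (fun x hx => h x (List.mem_cons_of_mem a hx))
    by_cases hka : k ≤ a
    · rcases ha hka with rfl | hk'a
      · have : ¬ k' ≤ a := by omega
        simp [this, htl]
        omega
      · have hne : a ≠ k := by omega
        simp [hka, hk'a, hne, htl]
        omega
    · have h1 : ¬ k' ≤ a := by omega
      have hne : a ≠ k := by omega
      simp [hka, h1, hne, htl]

-- the core invariant: A's fold over the remaining distinct values t, carrying
-- l = #{x ∈ arr | head t ≤ x}, appends exactly B's per-value counts
lemma fold_eq_map : ∀ (t : List Int) (arr : List Int) (acc : List Int) (l : Int),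
    t.Pairwise (· < ·) →
    (∀ x ∈ arr, x ∈ t ∨ (∀ k ∈ t, x < k)) →
    (∀ k ks, t = k :: ks → l = (arr.countP (fun x => decide (k ≤ x)) : Int)) →
    (t.foldl (fun (st : Int × List Int) k =>
        (st.1 - (List.count k arr : Int), st.2 ++ [st.1])) (l, acc)).2
      = acc ++ t.map (fun v => (arr.countP (fun x => decide (v ≤ x)) : Int)) := by
  intro t
  induction t with
  | nil => intro arr acc l _ _ _; simp
  | cons k ks ih =>
    intro arr acc l hp hmem hl
    have hlk : l = (arr.countP (fun x => decide (k ≤ x)) : Int) := hl k ks rfl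
    have hpk : ∀ y ∈ ks, k < y := (List.pairwise_cons.mp hp).1
    have hpks : ks.Pairwise (· < ·) := (List.pairwise_cons.mp hp).2
    rw [List.foldl_cons]
    rw [ih arr (acc ++ [l]) (l - (List.count k arr : Int)) hpks ?_ ?_]
    · simp [hlk]
    · -- membership hypothesis propagates to ks
      intro x hx
      rcases hmem x hx with hxt | hsm
      · rcases List.mem_cons.mp hxt with rfl | hxks
        · exact Or.inr (fun k' hk' => hpk k' hk')
        · exact Or.inl hxks
      · exact Or.inr (fun k' hk' => hsm k' (List.mem_cons_of_mem k hk'))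
    · -- the new l equals the count for the next distinct value
      intro k' ks' hks
      subst hks
      have hkk' : k < k' := hpk k' List.mem_cons_self
      have hsplit := countP_split k k' hkk' arr (by
        intro x hx hkx
        by_cases hxk : x = k
        · exact Or.inl hxk
        · rcases hmem x hx with hxt | hsm
          · rcases List.mem_cons.mp hxt with rfl | hxks
            · exact absurd rfl hxk
            · rcases List.mem_cons.mp hxks with rfl | hxks'
              · exact Or.inr le_rfl
              · exact Or.inr (le_of_lt ((List.pairwise_cons.mp hpks).1 x hxks'))
          · exact absurd hkx (by have := hsm k List.mem_cons_self; omega))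
      rw [hlk]
      push_cast [hsplit]
      ring

-- ===== VERDICT =====
theorem cut_the_ropes_spec : Claim_equal_cut_the_ropes := by
  intro arr _
  unfold Spec_cut_the_ropes cut_the_ropes cut_the_ropes_alt
  set s := PySem.List.sorted (PySem.Set.ofList arr) (fun x => x) with hs
  have hps : s.Pairwise (· < ·) := PySem.List.sorted_ofList_pairwise_lt arr
  have hmemS : ∀ x ∈ arr, x ∈ s := by
    intro x hx
    rw [hs, PySem.List.mem_sorted, PySem.Set.mem_ofList]
    exact hx
  simp only []
  rw [PySem.List.foldl_congr_mem _ _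
    (fun (st : Int × List Int) k => (st.1 - (List.count k arr : Int), st.2 ++ [st.1])) _
    (by
      intro st k hk
      rw [PySem.Dict.getD_counter])]
  rw [fold_eq_map s arr [] (arr.length : Int) hps (fun x hx => Or.inl (hmemS x hx)) ?_]
  · simp
  · intro k ks hks
    have hall : ∀ x ∈ arr, decide (k ≤ x) = true := by
      intro x hx
      have hxs : x ∈ s := hmemS x hx
      rw [hks] at hxs
      rcases List.mem_cons.mp hxs with rfl | hxks
      · simp
      · have := (List.pairwise_cons.mp (hks ▸ hps)).1 x hxks
        simp; omega
    rw [List.countP_eq_length.mpr hall]
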